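-- pv_equiv track=rewrite | github.com/hbrunie/PyFloT | public/scripts/Common.py | runAppMockup
-- ===== SOURCE A (Python) =====
-- def runAppMockup(btCallSiteIdList, sloc=False, dim=1):
--     """ CallSiteId are BT or SLOC?
--     """
--     ## MOCKUP:TODO
--     if sloc:
--         for i in btCallSiteIdList:
--             if i in [3]:
--                 return False
--     else:
--         for i in btCallSiteIdList:
--             if dim ==2:
--                 if i in [64, 65, 66, 67, 68, 69, 70, 71, 76, 77, 78, 79]:
--                     return False
--             if dim == 1:
--                 if i in [21,22,23]:
--                     return False
--     return True
-- ===== SOURCE B (Python) =====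
-- def _bisect_left(xs, target):
--     # textbook bisect.bisect_left (written out because A imports nothing)
--     lo, hi = 0, len(xs)
--     while lo < hi:
--         mid = (lo + hi) // 2
--         if xs[mid] < target:
--             lo = mid + 1
--         else:
--             hi = mid
--     return lo
--
--
-- def runAppMockup(btCallSiteIdList, sloc=False, dim=1):
--     """ CallSiteId are BT or SLOC?
--     """
--     # The flags select a short list of forbidden intervals; sort the input once and
--     # binary-search each interval's lower end: the list hits the interval iff the
--     # first element >= lo exists and is <= hi.
--     if sloc:
--         intervals = [(3, 3)]
--     elif dim == 2:
--         intervals = [(64, 71), (76, 79)]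
--     elif dim == 1:
--         intervals = [(21, 23)]
--     else:
--         intervals = []
--     xs = sorted(btCallSiteIdList)
--     for lo, hi in intervals:
--         j = _bisect_left(xs, lo)
--         if j < len(xs) and xs[j] <= hi:
--             return False
--     return True
-- ===== Notes on version B (the rewrite author's own statement) =====
-- stated objective: alternative
-- what changed: Instead of A's per-element loop testing each callsite id against a flag-selected blacklist with an early return, B sorts the input once and, for each of the (at most two) forbidden intervals selected by the flags, binary-searches the sorted list for the first element >= the interval's lower end and checks whether it is <= the upper end.
import Mathlib
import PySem

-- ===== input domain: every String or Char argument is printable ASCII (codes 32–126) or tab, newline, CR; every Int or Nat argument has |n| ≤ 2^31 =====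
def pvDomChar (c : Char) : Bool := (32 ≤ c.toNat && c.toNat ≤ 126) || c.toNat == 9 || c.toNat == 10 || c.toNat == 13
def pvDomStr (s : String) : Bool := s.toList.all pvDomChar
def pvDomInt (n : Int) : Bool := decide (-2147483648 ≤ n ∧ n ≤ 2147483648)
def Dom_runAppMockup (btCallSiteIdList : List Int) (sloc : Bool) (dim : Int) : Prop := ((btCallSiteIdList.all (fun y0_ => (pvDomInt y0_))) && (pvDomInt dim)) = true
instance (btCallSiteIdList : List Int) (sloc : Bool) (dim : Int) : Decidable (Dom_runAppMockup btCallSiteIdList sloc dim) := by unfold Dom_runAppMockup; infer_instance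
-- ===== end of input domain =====

-- B sorts the input once and binary-searches the lower end of each forbidden interval,
-- instead of A's per-element membership loop with early return (objective: alternative).

-- ===== PORT A =====
-- the 'for i in btCallSiteIdList: if i in [3]: return False' loop (sloc branch)
def pvLoopS : List Int → Bool
  | [] => true
  | i :: r => if i ∈ ([3] : List Int) then false else pvLoopS r

-- the else-branch loop: per element, the dim==2 test then the dim==1 test, early return on hit
def pvLoopB (dim : Int) : List Int → Bool
  | [] => true
  | i :: r =>
    if dim = 2 ∧ i ∈ ([64, 65, 66, 67, 68, 69, 70, 71, 76, 77, 78, 79] : List Int) then false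
    else if dim = 1 ∧ i ∈ ([21, 22, 23] : List Int) then false
    else pvLoopB dim r

def runAppMockup (btCallSiteIdList : List Int) (sloc : Bool) (dim : Int) : Bool :=
  if sloc then pvLoopS btCallSiteIdList else pvLoopB dim btCallSiteIdList

-- ===== PORT B =====
-- the 'for lo, hi in intervals' loop; Source B's _bisect_left is the textbook bisect.bisect_left
-- loop, ported as PySem.List.bisectLeft (the same lo/hi/mid loop); 'xs[j]' is read only under
-- the guard 'j < len(xs)', so List.getD is exact there
def pvCheckIntervals (xs : List Int) : List (Int × Int) → Bool
  | [] => true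
  | (lo, hi) :: rest =>
    let j := PySem.List.bisectLeft xs lo
    if j < xs.length ∧ xs.getD j 0 ≤ hi then false else pvCheckIntervals xs rest

def runAppMockup_alt (btCallSiteIdList : List Int) (sloc : Bool) (dim : Int) : Bool :=
  let intervals : List (Int × Int) :=
    if sloc then [(3, 3)]
    else if dim = 2 then [(64, 71), (76, 79)]
    else if dim = 1 then [(21, 23)]
    else []
  pvCheckIntervals (PySem.List.sorted btCallSiteIdList (fun x => x)) intervals

-- ===== PRECONDITION & SPEC =====
def Spec_runAppMockup (btCallSiteIdList : List Int) (sloc : Bool) (dim : Int) (out : Bool) : Prop := out = runAppMockup_alt btCallSiteIdList sloc dim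
instance (btCallSiteIdList : List Int) (sloc : Bool) (dim : Int) (out : Bool) : Decidable (Spec_runAppMockup btCallSiteIdList sloc dim out) := by unfold Spec_runAppMockup; infer_instance

-- ===== CLAIM (what is proved, stated in full; the proofs are below) =====
def Claim_equal_runAppMockup : Prop := ∀ (btCallSiteIdList : List Int) (sloc : Bool) (dim : Int), Dom_runAppMockup btCallSiteIdList sloc dim → Spec_runAppMockup btCallSiteIdList sloc dim (runAppMockup btCallSiteIdList sloc dim)

-- ===== LEMMAS AND PROOFS =====

-- the binary-search test on the sorted list is 'some element of xs lies in [lo, hi]'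
lemma hit_iff (xs : List Int) (lo hi : Int) :
    (PySem.List.bisectLeft (PySem.List.sorted xs (fun x => x)) lo <
       (PySem.List.sorted xs (fun x => x)).length ∧
     (PySem.List.sorted xs (fun x => x)).getD
       (PySem.List.bisectLeft (PySem.List.sorted xs (fun x => x)) lo) 0 ≤ hi)
    ↔ ∃ x ∈ xs, lo ≤ x ∧ x ≤ hi := by
  set s := PySem.List.sorted xs (fun x => x) with hs
  have hpair : s.Pairwise (· ≤ ·) := by
    simpa using PySem.List.sorted_pairwise xs (fun x => x)
  obtain ⟨hjle, hlt, hge⟩ := PySem.List.bisectLeft_spec s lo hpair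
  set j := PySem.List.bisectLeft s lo with hj
  constructor
  · rintro ⟨hjlen, hhi⟩
    refine ⟨s[j], ?_, ?_, ?_⟩
    · rw [← PySem.List.mem_sorted (key := fun x => x) (rev := false), ← hs]
      exact List.getElem_mem hjlen
    · exact hge j hjlen (le_refl j)
    · simpa [List.getD_eq_getElem?_getD, List.getElem?_eq_getElem hjlen] using hhi
  · rintro ⟨x, hx, hlox, hxhi⟩
    have hxs : x ∈ s := by
      rw [hs, PySem.List.mem_sorted]; exact hx
    obtain ⟨k, hk, hks⟩ := List.getElem_of_mem hxs
    have hjk : j ≤ k := by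
      by_contra hnot
      rw [Nat.not_le] at hnot
      have hklt := hlt k hk hnot
      rw [hks] at hklt
      omega
    refine ⟨by omega, ?_⟩
    have hmono : s[j] ≤ s[k] :=
      PySem.List.sorted_id_getElem_mono (xs := xs) (p := j) (q := k) hjk (by rw [← hs]; exact hk)
    have hjlen : j < s.length := by omega
    rw [List.getD_eq_getElem?_getD, List.getElem?_eq_getElem hjlen]
    simp only [Option.getD_some]
    calc s[j] ≤ s[k] := hmono
      _ = x := hks
      _ ≤ hi := hxhi

-- B's interval loop returns False iff some interval contains some element of xs
lemma check_false_iff (xs : List Int) (ivs : List (Int × Int)) :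
    pvCheckIntervals (PySem.List.sorted xs (fun x => x)) ivs = false ↔
      ∃ p ∈ ivs, ∃ x ∈ xs, p.1 ≤ x ∧ x ≤ p.2 := by
  induction ivs with
  | nil => simp [pvCheckIntervals]
  | cons p rest ih =>
    obtain ⟨lo, hi⟩ := p
    simp only [pvCheckIntervals]
    split_ifs with h
    · simp only [true_iff]
      exact ⟨(lo, hi), List.mem_cons_self, (hit_iff xs lo hi).mp h⟩
    · rw [ih]
      constructor
      · rintro ⟨q, hq, hx⟩; exact ⟨q, List.mem_cons_of_mem _ hq, hx⟩
      · rintro ⟨q, hq, hx⟩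
        rcases List.mem_cons.mp hq with rfl | hq'
        · exact absurd ((hit_iff xs lo hi).mpr hx) h
        · exact ⟨q, hq', hx⟩

lemma loopS_false_iff (xs : List Int) : pvLoopS xs = false ↔ 3 ∈ xs := by
  induction xs with
  | nil => simp [pvLoopS]
  | cons i r ih =>
    simp only [pvLoopS]
    by_cases h : i = 3
    · simp [h]
    · rw [if_neg (by simp [h]), ih, List.mem_cons]
      constructor
      · exact Or.inr
      · rintro (hh | hh)
        · exact absurd hh.symm h
        · exact hh

lemma loopB_false_iff (dim : Int) (xs : List Int) :
    pvLoopB dim xs = false ↔ ∃ i ∈ xs,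
      (dim = 2 ∧ i ∈ ([64, 65, 66, 67, 68, 69, 70, 71, 76, 77, 78, 79] : List Int)) ∨
      (dim = 1 ∧ i ∈ ([21, 22, 23] : List Int)) := by
  induction xs with
  | nil => simp [pvLoopB]
  | cons i r ih =>
    simp only [pvLoopB]
    split_ifs with h1 h2
    · exact iff_of_true rfl ⟨i, List.mem_cons_self, Or.inl h1⟩
    · exact iff_of_true rfl ⟨i, List.mem_cons_self, Or.inr h2⟩
    · rw [ih]
      constructor
      · rintro ⟨x, hx, hc⟩; exact ⟨x, List.mem_cons_of_mem _ hx, hc⟩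
      · rintro ⟨x, hx, hc⟩
        rcases List.mem_cons.mp hx with rfl | hx'
        · exact absurd hc (by tauto)
        · exact ⟨x, hx', hc⟩

-- glue: two Bools are equal when they are false together
lemma bool_eq_of_false_iff (a b : Bool) (h : (a = false) ↔ (b = false)) : a = b := by
  cases a <;> cases b <;> simp_all

-- ===== VERDICT (by name: the statement is the Claim_ definition above) =====
theorem runAppMockup_spec : Claim_equal_runAppMockup := by
  intro xs sloc dim _
  unfold Spec_runAppMockup runAppMockup runAppMockup_alt
  cases sloc with
  | true =>
    simp only [if_true]
    refine bool_eq_of_false_iff _ _ ?_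
    rw [loopS_false_iff, check_false_iff]
    constructor
    · intro h; exact ⟨(3, 3), by simp, 3, h, by omega⟩
    · rintro ⟨p, hp, x, hx, hle, hge⟩
      simp only [List.mem_singleton] at hp
      subst hp
      simp only at hle hge
      have : x = 3 := by omega
      subst this; exact hx
  | false =>
    simp only [Bool.false_eq_true, if_false]
    refine bool_eq_of_false_iff _ _ ?_
    rw [loopB_false_iff]
    by_cases h2 : dim = 2
    · rw [if_pos h2, check_false_iff]
      constructor
      · rintro ⟨i, hi, ⟨-, hmem⟩ | ⟨habs, -⟩⟩
        · simp only [List.mem_cons, List.not_mem_nil, or_false] at hmem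
          rcases hmem with h|h|h|h|h|h|h|h|h|h|h|h
          all_goals first
            | exact ⟨(64, 71), by simp, i, hi, by omega⟩
            | exact ⟨(76, 79), by simp, i, hi, by omega⟩
        · exact absurd habs (by omega)
      · rintro ⟨p, hp, x, hx, hle, hge⟩
        refine ⟨x, hx, Or.inl ⟨h2, ?_⟩⟩
        rcases List.mem_cons.mp hp with rfl | hp'
        · simp only at hle hge; simp; omega
        · simp only [List.mem_singleton] at hp'
          subst hp'
          simp only at hle hge; simp; omega
    · by_cases h1 : dim = 1
      · rw [if_neg h2, if_pos h1, check_false_iff]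
        constructor
        · rintro ⟨i, hi, ⟨habs, -⟩ | ⟨-, hmem⟩⟩
          · exact absurd habs (by omega)
          · simp only [List.mem_cons, List.not_mem_nil, or_false] at hmem
            rcases hmem with h|h|h <;> exact ⟨(21, 23), by simp, i, hi, by omega⟩
        · rintro ⟨p, hp, x, hx, hle, hge⟩
          simp only [List.mem_singleton] at hp
          subst hp
          simp only at hle hge
          exact ⟨x, hx, Or.inr ⟨h1, by simp; omega⟩⟩
      · rw [if_neg h2, if_neg h1]
        simp only [pvCheckIntervals]
        constructor
        · rintro ⟨x, hx, ⟨h, -⟩ | ⟨h, -⟩⟩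
          · exact absurd h h2
          · exact absurd h h1
        · intro h; simp at h
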